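-- pv_equiv track=rewrite | github.com/Minouneshan/CS313E-UTAustin | HW13-Reducible.py.py | step_size
-- ===== SOURCE A (Python) =====
-- def step_size (s, const):
--
--   hash_value = 0
--   power26 = 1
--
--   # computes the hash value for the string using powers of 26
--   # converts each character into a number, multiplies it by
--   # its respective power of 26 and adds it to the hash value
--   for i in range(len(s) - 1, -1, -1):
--     letter = ord(s[i]) - 96
--     hash_value += power26 * letter
--     power26 *= 26
--
--   return const - (hash_value % const)
-- ===== SOURCE B (Python) =====
-- def step_size(s, const):
--     hash_value = 0
--     for ch in s:
--         hash_value = hash_value * 26 + (ord(ch) - 96)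
--     return const - (hash_value % const)
-- ===== Notes on version B (the rewrite author's own statement) =====
-- stated objective: simpler
-- what changed: Replaces the backward index loop that maintains an explicit power-of-26 accumulator with a forward Horner-scheme pass over the characters keeping a single accumulator.
import Mathlib
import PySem

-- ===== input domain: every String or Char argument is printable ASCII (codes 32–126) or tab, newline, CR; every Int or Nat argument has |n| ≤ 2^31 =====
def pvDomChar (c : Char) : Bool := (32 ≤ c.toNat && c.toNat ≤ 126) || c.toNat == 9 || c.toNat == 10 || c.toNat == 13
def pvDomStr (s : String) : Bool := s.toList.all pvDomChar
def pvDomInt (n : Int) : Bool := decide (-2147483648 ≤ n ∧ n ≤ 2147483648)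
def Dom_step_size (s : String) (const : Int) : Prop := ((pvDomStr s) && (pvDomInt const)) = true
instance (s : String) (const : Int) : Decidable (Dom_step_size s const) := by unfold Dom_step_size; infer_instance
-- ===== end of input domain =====

-- B = A via a Horner-scheme rewrite of the polynomial hash; return value identical for const ≠ 0.

-- ===== PORT A =====
-- backward index loop, explicit power26 accumulator
def step_size (s : String) (const : Int) : Int :=
  let cs := s.toList
  let st := (PySem.List.pyRange ((cs.length : Int) - 1) (-1) (-1)).foldl
    (fun (st : Int × Int) i =>
      (st.1 + st.2 * (((PySem.List.pyGetD cs i ' ').toNat : Int) - 96), st.2 * 26)) (0, 1)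
  const - PySem.Int.mod st.1 const

-- ===== PORT B =====
-- forward Horner pass, single accumulator
def step_size_alt (s : String) (const : Int) : Int :=
  let h := s.toList.foldl (fun acc ch => acc * 26 + ((ch.toNat : Int) - 96)) 0
  const - PySem.Int.mod h const

-- ===== PRECONDITION & SPEC =====
-- Pre_ excludes exactly const = 0, where Python's '%' raises ZeroDivisionError in both A and B.
def Pre_step_size (s : String) (const : Int) : Prop := const ≠ 0
instance (s : String) (const : Int) : Decidable (Pre_step_size s const) := by unfold Pre_step_size; infer_instance
def pvWitness_step_size : String × Int := ("abc", 7)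

def Spec_step_size (s : String) (const : Int) (out : Int) : Prop := out = step_size_alt s const
instance (s : String) (const : Int) (out : Int) : Decidable (Spec_step_size s const out) := by unfold Spec_step_size; infer_instance

-- ===== CLAIM (what is proved, stated in full; the proofs are below) =====
def Claim_equal_step_size : Prop := ∀ (s : String) (const : Int), Dom_step_size s const → Pre_step_size s const → Spec_step_size s const (step_size s const)

-- ===== LEMMAS AND PROOFS =====

-- A's backward power26 loop computes Horner's value: invariant over the reversed index range.
lemma hash_loop (cs : List Char) (h p : Int) :
    (PySem.List.pyRange ((cs.length : Int) - 1) (-1) (-1)).foldl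
      (fun (st : Int × Int) i =>
        (st.1 + st.2 * (((PySem.List.pyGetD cs i ' ').toNat : Int) - 96), st.2 * 26)) (h, p)
    = (h + p * cs.foldl (fun acc ch => acc * 26 + ((ch.toNat : Int) - 96)) 0,
       p * 26 ^ cs.length) := by
  induction cs using List.reverseRecOn generalizing h p with
  | nil =>
      rw [PySem.List.pyRange_neg_one_eq_nil (by norm_num)]
      simp
  | append_singleton ys c ih =>
      have hlen : ((ys ++ [c]).length : Int) - 1 = (ys.length : Int) := by
        simp
      rw [hlen, PySem.List.pyRange_neg_one_cons (by omega)]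
      simp only [List.foldl_cons]
      have hget : PySem.List.pyGetD (ys ++ [c]) ((ys.length : Int)) ' ' = c := by
        rw [PySem.List.pyGetD_natCast]
        simp [List.getD]
      rw [hget]
      have hcongr :
          (PySem.List.pyRange ((ys.length : Int) - 1) (-1) (-1)).foldl
            (fun (st : Int × Int) i =>
              (st.1 + st.2 * (((PySem.List.pyGetD (ys ++ [c]) i ' ').toNat : Int) - 96), st.2 * 26))
            (h + p * (((c.toNat : Int)) - 96), p * 26)
          = (PySem.List.pyRange ((ys.length : Int) - 1) (-1) (-1)).foldl
            (fun (st : Int × Int) i =>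
              (st.1 + st.2 * (((PySem.List.pyGetD ys i ' ').toNat : Int) - 96), st.2 * 26))
            (h + p * (((c.toNat : Int)) - 96), p * 26) := by
        apply PySem.List.foldl_congr_mem
        intro acc i hi
        rw [PySem.List.mem_pyRange_neg_one] at hi
        have h0 : 0 ≤ i := by omega
        have h1 : i < (ys.length : Int) := by omega
        have h2 : i < ((ys ++ [c]).length : Int) := by simp; omega
        rw [PySem.List.pyGetD_eq_getElem (ys ++ [c]) ' ' h0 h2,
            PySem.List.pyGetD_eq_getElem ys ' ' h0 h1,
            List.getElem_append_left (by omega : i.toNat < ys.length)]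
      rw [hcongr, ih]
      rw [List.foldl_append]
      simp only [List.foldl_cons, List.foldl_nil, List.length_append, List.length_cons,
        List.length_nil]
      apply Prod.ext
      · ring
      · show p * 26 * 26 ^ ys.length = p * 26 ^ (ys.length + (0 + 1))
        rw [pow_succ]; ring

-- ===== VERDICT (by name: the statement is the Claim_ definition above) =====
theorem step_size_spec : Claim_equal_step_size := by
  intro s const _ _
  unfold Spec_step_size step_size step_size_alt
  dsimp only
  rw [hash_loop]
  simp
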